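-- pv_equiv track=rewrite | github.com/jagaldol/Algorithm-problem-solving | programmers/level_2/3xn 타일링.py | solution
-- ===== SOURCE A (Python) =====
-- def solution(n):
--     prev = (1, 2)
--
--     for i in range(1, n // 2):
--         prev = (
--             (prev[0] + prev[1]) % 1_000_000_007,
--             (prev[0] * 2 + prev[1] * 3) % 1_000_000_007,
--         )
--
--     answer = (prev[0] + prev[1]) % 1_000_000_007
--
--     return answer
-- ===== SOURCE B (Python) =====
-- def solution(n):
--     MOD = 1_000_000_007
--
--     def mat_mul(x, y):
--         return (
--             (x[0] * y[0] + x[1] * y[2]) % MOD,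
--             (x[0] * y[1] + x[1] * y[3]) % MOD,
--             (x[2] * y[0] + x[3] * y[2]) % MOD,
--             (x[2] * y[1] + x[3] * y[3]) % MOD,
--         )
--
--     k = n // 2 - 1
--     m = (1, 0, 0, 1)
--     base = (1, 1, 2, 3)
--     while k > 0:
--         if k & 1:
--             m = mat_mul(m, base)
--         base = mat_mul(base, base)
--         k >>= 1
--     a = (m[0] * 1 + m[1] * 2) % MOD
--     b = (m[2] * 1 + m[3] * 2) % MOD
--     return (a + b) % MOD
-- ===== Notes on version B (the rewrite author's own statement) =====
-- stated objective: faster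
-- what changed: Replaces the O(n) step-by-step linear recurrence loop with binary exponentiation of the fixed 2x2 transition matrix modulo the same prime constant, applied to the initial vector (1,2).
import Mathlib
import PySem

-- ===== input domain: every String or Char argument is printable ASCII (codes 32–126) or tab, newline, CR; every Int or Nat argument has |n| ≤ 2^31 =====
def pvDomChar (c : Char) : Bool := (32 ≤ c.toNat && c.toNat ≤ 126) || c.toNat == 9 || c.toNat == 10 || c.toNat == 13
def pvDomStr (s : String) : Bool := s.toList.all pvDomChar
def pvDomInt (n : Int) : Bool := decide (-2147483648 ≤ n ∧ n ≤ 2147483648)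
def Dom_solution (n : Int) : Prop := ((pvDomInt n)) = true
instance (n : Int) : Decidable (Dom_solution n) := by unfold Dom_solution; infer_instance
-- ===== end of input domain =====

-- B replaces A's linear-time recurrence loop by binary exponentiation of the fixed 2x2
-- transition matrix modulo the same prime constant (asymptotically faster).


-- ===== PORT A =====
def solution (n : Int) : Int :=
  let prev : Int × Int := (1, 2)
  let prev := (PySem.List.pyRange 1 (PySem.Int.floordiv n 2) 1).foldl
    (fun pr _ =>
      (PySem.Int.mod (pr.1 + pr.2) 1000000007,
       PySem.Int.mod (pr.1 * 2 + pr.2 * 3) 1000000007)) prev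
  PySem.Int.mod (prev.1 + prev.2) 1000000007

-- ===== PORT B =====
-- 2x2 matrix as a quadruple (row-major), entries kept reduced modulo the prime
def pvMatMul (x y : Int × Int × Int × Int) : Int × Int × Int × Int :=
  (PySem.Int.mod (x.1 * y.1 + x.2.1 * y.2.2.1) 1000000007,
   PySem.Int.mod (x.1 * y.2.1 + x.2.1 * y.2.2.2) 1000000007,
   PySem.Int.mod (x.2.2.1 * y.1 + x.2.2.2 * y.2.2.1) 1000000007,
   PySem.Int.mod (x.2.2.1 * y.2.1 + x.2.2.2 * y.2.2.2) 1000000007)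

-- the `while k > 0` loop; `k & 1` is `k % 2 == 1` and `k >>= 1` is `k //= 2`,
-- which are exact for the k > 0 reached inside the loop
def pvPowLoop (m base : Int × Int × Int × Int) (k : Int) :
    Int × Int × Int × Int :=
  if _h : 0 < k then
    pvPowLoop (if PySem.Int.mod k 2 == 1 then pvMatMul m base else m)
      (pvMatMul base base) (PySem.Int.floordiv k 2)
  else m
termination_by k.toNat
decreasing_by
  rw [PySem.Int.floordiv_eq_ediv_of_pos (by norm_num)]
  omega

def solution_alt (n : Int) : Int :=
  let k := PySem.Int.floordiv n 2 - 1
  let m := pvPowLoop (1, 0, 0, 1) (1, 1, 2, 3) k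
  let a := PySem.Int.mod (m.1 * 1 + m.2.1 * 2) 1000000007
  let b := PySem.Int.mod (m.2.2.1 * 1 + m.2.2.2 * 2) 1000000007
  PySem.Int.mod (a + b) 1000000007

-- ===== PRECONDITION & SPEC =====
def Spec_solution (n : Int) (out : Int) : Prop := out = solution_alt n
instance (n : Int) (out : Int) : Decidable (Spec_solution n out) := by unfold Spec_solution; infer_instance

-- ===== CLAIM (what is proved, stated in full; the proofs are below) =====
def Claim_equal_solution : Prop := ∀ (n : Int), Dom_solution n → Spec_solution n (solution n)

-- ===== LEMMAS AND PROOFS =====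

-- cast a pair into the residue ring
def pvC2 (v : Int × Int) : ZMod 1000000007 × ZMod 1000000007 := ((v.1 : ZMod 1000000007), (v.2 : ZMod 1000000007))

-- the linear map on (ZMod p)² described by a quadruple
def pvF (q : Int × Int × Int × Int) :
    ZMod 1000000007 × ZMod 1000000007 → ZMod 1000000007 × ZMod 1000000007 :=
  fun v => ((q.1 : ZMod 1000000007) * v.1 + (q.2.1 : ZMod 1000000007) * v.2,
            (q.2.2.1 : ZMod 1000000007) * v.1 + (q.2.2.2 : ZMod 1000000007) * v.2)

lemma pv_cast_mod (a : Int) :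
    ((PySem.Int.mod a 1000000007 : Int) : ZMod 1000000007) = (a : ZMod 1000000007) := by
  rw [PySem.Int.mod_eq_emod_of_pos (by norm_num)]
  have h : (1000000007 : Int) = ((1000000007 : Nat) : Int) := by norm_num
  rw [h]
  exact_mod_cast ZMod.intCast_mod a 1000000007

lemma pv_mod_bounds (a : Int) :
    0 ≤ PySem.Int.mod a 1000000007 ∧ PySem.Int.mod a 1000000007 < 1000000007 := by
  rw [PySem.Int.mod_eq_emod_of_pos (by norm_num)]
  constructor
  · exact Int.emod_nonneg a (by norm_num)
  · exact Int.emod_lt_of_pos a (by norm_num)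

lemma pv_int_eq_of_cast_eq (a b : Int) (ha : 0 ≤ a ∧ a < 1000000007)
    (hb : 0 ≤ b ∧ b < 1000000007)
    (h : (a : ZMod 1000000007) = (b : ZMod 1000000007)) : a = b := by
  have h2 := (ZMod.intCast_eq_intCast_iff' a b 1000000007).mp h
  unfold Int.ModEq at h2
  rw [Int.emod_eq_of_lt ha.1 (by exact_mod_cast ha.2),
      Int.emod_eq_of_lt hb.1 (by exact_mod_cast hb.2)] at h2
  exact h2

lemma pvF_mul (x y : Int × Int × Int × Int) :
    pvF (pvMatMul x y) = pvF x ∘ pvF y := by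
  funext v
  simp only [pvF, pvMatMul, Function.comp_apply, pv_cast_mod]
  push_cast
  rw [Prod.mk.injEq]
  constructor <;> ring

lemma pvF_powLoop (m base : Int × Int × Int × Int) (k : Int) :
    pvF (pvPowLoop m base k) = pvF m ∘ (pvF base)^[k.toNat] := by
  fun_induction pvPowLoop m base k with
  | case1 m base k h ih =>
      simp only [dite_eq_ite] at ih
      rw [ih, pvF_mul]
      have hsq : pvF base ∘ pvF base = (pvF base)^[2] := by
        funext v; simp [Function.iterate_succ_apply']
      have hfd : PySem.Int.floordiv k 2 = k / 2 :=
        PySem.Int.floordiv_eq_ediv_of_pos (by norm_num)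
      have hmod : PySem.Int.mod k 2 = k % 2 :=
        PySem.Int.mod_eq_emod_of_pos (by norm_num)
      by_cases hodd : PySem.Int.mod k 2 == 1
      · have hk : k.toNat = 2 * (k / 2).toNat + 1 := by
          have := beq_iff_eq.mp hodd; omega
        simp only [hodd, if_true, pvF_mul, hfd, hsq, hk,
          Function.iterate_succ', Function.iterate_mul]
        rfl
      · have hk : k.toNat = 2 * (k / 2).toNat := by
          rw [hmod] at hodd
          have : ¬ (k % 2 = 1) := by simpa using hodd
          omega
        rw [if_neg hodd, hfd, hsq, ← Function.iterate_mul, ← hk]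
  | case2 m base k h => simp [Int.toNat_of_nonpos (by omega : k ≤ 0), Function.iterate_zero]

lemma pv_foldl_const {α β : Type} (l : List α) (f : β → β) (init : β) :
    l.foldl (fun a _ => f a) init = f^[l.length] init := by
  induction l generalizing init with
  | nil => rfl
  | cons x xs ih => simp [List.foldl_cons, ih, Function.iterate_succ_apply]

-- A's loop body semiconjugates (under casting) with the linear map of the base matrix
lemma pv_step_cast (v : Int × Int) :
    pvC2 (PySem.Int.mod (v.1 + v.2) 1000000007,
          PySem.Int.mod (v.1 * 2 + v.2 * 3) 1000000007)
      = pvF (1, 1, 2, 3) (pvC2 v) := by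
  simp only [pvC2, pvF, pv_cast_mod]
  push_cast
  rw [Prod.mk.injEq]
  constructor <;> ring

lemma pv_state_cast (j : Nat) (v : Int × Int) :
    pvC2 ((fun pr : Int × Int =>
            (PySem.Int.mod (pr.1 + pr.2) 1000000007,
             PySem.Int.mod (pr.1 * 2 + pr.2 * 3) 1000000007))^[j] v)
      = (pvF (1, 1, 2, 3))^[j] (pvC2 v) := by
  induction j generalizing v with
  | zero => rfl
  | succ j ih => rw [Function.iterate_succ_apply, Function.iterate_succ_apply, ih, pv_step_cast]

-- ===== VERDICT (by name: the statement is the Claim_ definition above) =====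
theorem solution_spec : Claim_equal_solution := by
  intro n _
  unfold Spec_solution solution solution_alt
  set t := PySem.Int.floordiv n 2 with ht
  -- both sides reduced mod p; compare their images in ZMod p
  apply pv_int_eq_of_cast_eq _ _ (pv_mod_bounds _) (pv_mod_bounds _)
  -- A's state after the fold
  rw [pv_foldl_const (f := fun pr : Int × Int =>
        (PySem.Int.mod (pr.1 + pr.2) 1000000007,
         PySem.Int.mod (pr.1 * 2 + pr.2 * 3) 1000000007))]
  rw [PySem.List.length_pyRange_one]
  have hA := pv_state_cast (t - 1).toNat ((1 : Int), (2 : Int))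
  have hB := pvF_powLoop (1, 0, 0, 1) (1, 1, 2, 3) (t - 1)
  set s := (fun pr : Int × Int =>
        (PySem.Int.mod (pr.1 + pr.2) 1000000007,
         PySem.Int.mod (pr.1 * 2 + pr.2 * 3) 1000000007))^[(t-1).toNat] ((1:Int), (2:Int)) with hs
  set mfin := pvPowLoop (1, 0, 0, 1) (1, 1, 2, 3) (t - 1) with hm
  -- cast both final answers
  rw [pv_cast_mod, pv_cast_mod]
  push_cast [pv_cast_mod]
  have h1 : ((s.1 : ZMod 1000000007) + (s.2 : ZMod 1000000007))
      = ((pvF (1,1,2,3))^[(t-1).toNat] (pvC2 (1, 2))).1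
        + ((pvF (1,1,2,3))^[(t-1).toNat] (pvC2 (1, 2))).2 := by
    rw [← hA]; rfl
  have h2 : ((mfin.1 : ZMod 1000000007) * 1 + (mfin.2.1 : ZMod 1000000007) * 2)
        + ((mfin.2.2.1 : ZMod 1000000007) * 1 + (mfin.2.2.2 : ZMod 1000000007) * 2)
      = ((pvF (1,1,2,3))^[(t-1).toNat] (pvC2 (1, 2))).1
        + ((pvF (1,1,2,3))^[(t-1).toNat] (pvC2 (1, 2))).2 := by
    have := congrFun hB (pvC2 (1, 2))
    have hid : pvF (1, 0, 0, 1) ((pvF (1,1,2,3))^[(t-1).toNat] (pvC2 (1, 2)))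
        = (pvF (1,1,2,3))^[(t-1).toNat] (pvC2 (1, 2)) := by
      simp [pvF]
    rw [Function.comp_apply, hid] at this
    rw [← this]
    simp [pvF, pvC2]
  linear_combination h1 - h2
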